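-- pv_equiv track=rewrite | github.com/AndrewMonteith/DiagnosticDatasetScripts | missed_diagnostics_2.py | find_missed_commits
-- ===== SOURCE A (Python) =====
-- def find_missed_commits(grains_and_files):
--     max_grain = max(max(grains) for (grains, _) in grains_and_files)
--
--     missing_subsequence = []
--     for (grains, file) in grains_and_files:
--         if max_grain in grains:
--             missing_subsequence.append(file)
--             if len(missing_subsequence) > 2:
--                 yield missing_subsequence
--             missing_subsequence = [file]
--         else:
--             missing_subsequence.append(file)
-- ===== SOURCE B (Python) =====
-- def find_missed_commits(grains_and_files):
--     max_grain = max(max(grains) for (grains, _) in grains_and_files)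
--
--     files = []
--     boundaries = []
--     for i, (grains, file) in enumerate(grains_and_files):
--         files.append(file)
--         if max_grain in grains:
--             boundaries.append(i)
--
--     prev = 0
--     for b in boundaries:
--         seg = files[prev:b + 1]
--         if len(seg) > 2:
--             yield seg
--         prev = b
-- ===== Notes on version B (the rewrite author's own statement) =====
-- stated objective: alternative
-- what changed: A builds and yields segments on the fly with a mutable accumulator reset at each boundary; B first records the file list and the boundary indices, then emits each qualifying segment as a slice files[prev:b+1] between consecutive boundaries.
import Mathlib
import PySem

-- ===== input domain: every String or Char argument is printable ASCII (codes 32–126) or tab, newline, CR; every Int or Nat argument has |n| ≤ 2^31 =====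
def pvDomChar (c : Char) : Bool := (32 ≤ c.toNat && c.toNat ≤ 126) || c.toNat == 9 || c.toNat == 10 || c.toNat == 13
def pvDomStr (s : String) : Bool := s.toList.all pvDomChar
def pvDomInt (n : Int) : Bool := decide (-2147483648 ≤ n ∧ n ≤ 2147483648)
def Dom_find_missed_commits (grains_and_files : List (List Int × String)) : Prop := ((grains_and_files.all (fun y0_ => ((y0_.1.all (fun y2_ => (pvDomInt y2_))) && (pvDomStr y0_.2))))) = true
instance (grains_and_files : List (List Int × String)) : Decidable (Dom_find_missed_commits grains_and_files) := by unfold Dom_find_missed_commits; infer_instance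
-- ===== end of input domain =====

-- B records the file list and the boundary indices first, then emits each qualifying
-- segment as the slice files[prev:b+1]; A instead grows and resets a mutable segment
-- in a single pass.  Objective: alternative decomposition; same cost.

-- ===== PORT A =====
-- max(...) raises on an empty list; Pre_ excludes those inputs, so .getD 0 is never reached
def find_missed_commits (grains_and_files : List (List Int × String)) : List (List String) :=
  let max_grain : Int :=
    (PySem.List.max? (grains_and_files.map
        (fun p => (PySem.List.max? p.1 (fun y => y)).getD 0)) (fun y => y)).getD 0
  (grains_and_files.foldl
    (fun (st : List String × List (List String)) p =>
      if max_grain ∈ p.1 then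
        let ms := st.1 ++ [p.2]
        if ms.length > 2 then ([p.2], st.2 ++ [ms]) else ([p.2], st.2)
      else (st.1 ++ [p.2], st.2))
    ([], [])).2

-- ===== PORT B =====
def find_missed_commits_alt (grains_and_files : List (List Int × String)) : List (List String) :=
  let max_grain : Int :=
    (PySem.List.max? (grains_and_files.map
        (fun p => (PySem.List.max? p.1 (fun y => y)).getD 0)) (fun y => y)).getD 0
  let fb :=
    (PySem.List.enumerate grains_and_files 0).foldl
      (fun (st : List String × List Int) ip =>
        (st.1 ++ [ip.2.2], if max_grain ∈ ip.2.1 then st.2 ++ [ip.1] else st.2))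
      ([], [])
  (fb.2.foldl
    (fun (st : Int × List (List String)) b =>
      let seg := PySem.List.slice fb.1 (some st.1) (some (b + 1))
      (b, if seg.length > 2 then st.2 ++ [seg] else st.2))
    (0, [])).2

-- ===== PRECONDITION & SPEC =====
-- Pre_ excludes exactly the inputs where Python A raises ValueError: an empty
-- outer list or an element with an empty grains list (max of an empty sequence).
def Pre_find_missed_commits (grains_and_files : List (List Int × String)) : Prop :=
  grains_and_files ≠ [] ∧ ∀ p ∈ grains_and_files, p.1 ≠ []
instance (grains_and_files : List (List Int × String)) : Decidable (Pre_find_missed_commits grains_and_files) := by unfold Pre_find_missed_commits; infer_instance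
def pvWitness_find_missed_commits : (List (List Int × String)) :=
  [([1], "a"), ([2], "b"), ([1, 2], "c"), ([1], "d")]

def Spec_find_missed_commits (grains_and_files : List (List Int × String)) (out : List (List String)) : Prop := out = find_missed_commits_alt grains_and_files
instance (grains_and_files : List (List Int × String)) (out : List (List String)) : Decidable (Spec_find_missed_commits grains_and_files out) := by unfold Spec_find_missed_commits; infer_instance

-- ===== CLAIM (what is proved, stated in full; the proofs are below) =====
def Claim_equal_find_missed_commits : Prop := ∀ (grains_and_files : List (List Int × String)), Dom_find_missed_commits grains_and_files → Pre_find_missed_commits grains_and_files → Spec_find_missed_commits grains_and_files (find_missed_commits grains_and_files)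

-- ===== LEMMAS AND PROOFS =====

-- the common mathematical shape of both results: segments between boundaries
def segsFn (m : Int) : List String → List (List Int × String) → List (List String)
  | _, [] => []
  | cur, (gr, f) :: t =>
    if m ∈ gr then
      (if (cur ++ [f]).length > 2 then [cur ++ [f]] else []) ++ segsFn m [f] t
    else segsFn m (cur ++ [f]) t

-- boundary indices of t when its first element has absolute index j
def bdsFn (m : Int) : List (List Int × String) → Nat → List Int
  | [], _ => []
  | (gr, _) :: t, j => (if m ∈ gr then [(j : Int)] else []) ++ bdsFn m t (j + 1)

theorem aLoop_eq_segs (m : Int) (t : List (List Int × String))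
    (cur : List String) (out : List (List String)) :
    (t.foldl
      (fun (st : List String × List (List String)) p =>
        if m ∈ p.1 then
          let ms := st.1 ++ [p.2]
          if ms.length > 2 then ([p.2], st.2 ++ [ms]) else ([p.2], st.2)
        else (st.1 ++ [p.2], st.2))
      (cur, out)).2 = out ++ segsFn m cur t := by
  induction t generalizing cur out with
  | nil => simp [segsFn]
  | cons p t ih =>
    obtain ⟨gr, f⟩ := p
    rw [List.foldl_cons]
    show (List.foldl _
        (if m ∈ gr then
          if (cur ++ [f]).length > 2 then ([f], out ++ [cur ++ [f]]) else ([f], out)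
        else (cur ++ [f], out)) t).2 = _
    by_cases h : m ∈ gr
    · rw [if_pos h]
      by_cases h2 : (cur ++ [f]).length > 2
      · rw [if_pos h2, ih]
        have h2' : 2 ≤ cur.length := by simp at h2; omega
        simp [segsFn, h, h2']
      · rw [if_neg h2, ih]
        have h2' : ¬ 2 ≤ cur.length := by simp at h2; omega
        simp [segsFn, h, h2']
    · rw [if_neg h, ih]; simp [segsFn, h]

theorem bLoop_eq_bds (m : Int) (t : List (List Int × String)) (j : Nat)
    (fs : List String) (bd : List Int) :
    ((PySem.List.enumerate t (j : Int)).foldl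
      (fun (st : List String × List Int) ip =>
        (st.1 ++ [ip.2.2], if m ∈ ip.2.1 then st.2 ++ [ip.1] else st.2))
      (fs, bd)) = (fs ++ t.map (·.2), bd ++ bdsFn m t j) := by
  induction t generalizing j fs bd with
  | nil => simp [PySem.List.enumerate_nil, bdsFn]
  | cons p t ih =>
    obtain ⟨gr, f⟩ := p
    rw [PySem.List.enumerate_cons]
    have hcast : (j : Int) + 1 = ((j + 1 : Nat) : Int) := by push_cast; ring
    simp only [List.foldl_cons, bdsFn, hcast, ih]
    by_cases h : m ∈ gr <;> simp [h, List.append_assoc]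

theorem take_succ_sub (F : List String) (prev j : Nat) (f : String)
    (rest : List String) (hpj : prev ≤ j) (hd : F.drop j = f :: rest) :
    (F.drop prev).take (j + 1 - prev) = (F.drop prev).take (j - prev) ++ [f] := by
  have hdd : (F.drop prev).drop (j - prev) = f :: rest := by
    rw [List.drop_drop, show prev + (j - prev) = j from by omega, hd]
  have hget : (F.drop prev)[j - prev]? = some f := by
    rw [← List.head?_drop, hdd, List.head?_cons]
  have : j + 1 - prev = (j - prev) + 1 := by omega
  rw [this, List.take_add_one, hget, Option.toList_some]

theorem cLoop_eq_segs (m : Int) (F : List String) (t : List (List Int × String))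
    (prev j : Nat) (out : List (List String)) (hpj : prev ≤ j)
    (hF : F.drop j = t.map (·.2)) :
    ((bdsFn m t j).foldl
      (fun (st : Int × List (List String)) b =>
        let seg := PySem.List.slice F (some st.1) (some (b + 1))
        (b, if seg.length > 2 then st.2 ++ [seg] else st.2))
      ((prev : Int), out)).2
      = out ++ segsFn m ((F.drop prev).take (j - prev)) t := by
  induction t generalizing prev j out with
  | nil => simp [bdsFn, segsFn]
  | cons p t ih =>
    obtain ⟨gr, f⟩ := p
    have hF' : F.drop (j + 1) = t.map (·.2) := by
      rw [← List.tail_drop, hF]; simp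
    have hseg : (F.drop prev).take (j + 1 - prev) = (F.drop prev).take (j - prev) ++ [f] :=
      take_succ_sub F prev j f (t.map (·.2)) hpj (by simpa using hF)
    by_cases h : m ∈ gr
    · have hcast : (j : Int) + 1 = ((j + 1 : Nat) : Int) := by push_cast; ring
      have hslice : PySem.List.slice F (some (prev : Int)) (some ((j : Int) + 1))
          = (F.drop prev).take (j - prev) ++ [f] := by
        rw [hcast, PySem.List.slice_natCast, hseg]
      have hone : (F.drop j).take (j + 1 - j) = [f] := by
        rw [show j + 1 - j = 1 by omega, hF]; simp
      simp only [bdsFn, h, if_pos, List.singleton_append, List.foldl_cons, hslice]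
      rw [ih j (j + 1) _ (by omega) hF']
      rw [hone]
      simp only [segsFn, if_pos h]
      split_ifs <;> simp
    · simp only [bdsFn, h, if_neg, List.nil_append, not_false_iff]
      rw [ih prev (j + 1) out (by omega) hF', hseg]
      simp [segsFn, h]

-- ===== VERDICT (by name: the statement is the Claim_ definition above) =====
theorem find_missed_commits_spec : Claim_equal_find_missed_commits := by
  intro g _ _
  unfold Spec_find_missed_commits find_missed_commits find_missed_commits_alt
  simp only []
  rw [aLoop_eq_segs]
  rw [show (0 : Int) = ((0 : Nat) : Int) from rfl, bLoop_eq_bds]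
  simp only [List.nil_append]
  rw [cLoop_eq_segs _ (g.map (·.2)) g 0 0 [] le_rfl (by simp)]
  simp
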